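-- pv_equiv track=rewrite | github.com/JamesBondOOO7/Competitive-Programming | A/SumOf2050.py | div2050
-- ===== SOURCE A (Python) =====
-- def div2050(n):
--
--     if n<2050:
--         return -1
--
--     if n%2050 == 0:
--         num = n//2050
--
--         count = 0
--         while num != 0:
--             count += num % 10
--             num = num//10
--
--         return count
--
--     else:
--         return -1
-- ===== SOURCE B (Python) =====
-- def div2050(n):
--     if n < 2050:
--         return -1
--     if n % 2050 != 0:
--         return -1
--     return sum(ord(c) - 48 for c in str(n // 2050))
-- ===== Notes on version B (the rewrite author's own statement) =====
-- stated objective: idiomatic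
-- what changed: Replaces the arithmetic extraction loop (repeated mod and floor-division by ten) (low-to-high digits with a running counter) by summing over the decimal string representation str(n//2050) (high-to-low character traversal), a different data representation of the digits.
import Mathlib
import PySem

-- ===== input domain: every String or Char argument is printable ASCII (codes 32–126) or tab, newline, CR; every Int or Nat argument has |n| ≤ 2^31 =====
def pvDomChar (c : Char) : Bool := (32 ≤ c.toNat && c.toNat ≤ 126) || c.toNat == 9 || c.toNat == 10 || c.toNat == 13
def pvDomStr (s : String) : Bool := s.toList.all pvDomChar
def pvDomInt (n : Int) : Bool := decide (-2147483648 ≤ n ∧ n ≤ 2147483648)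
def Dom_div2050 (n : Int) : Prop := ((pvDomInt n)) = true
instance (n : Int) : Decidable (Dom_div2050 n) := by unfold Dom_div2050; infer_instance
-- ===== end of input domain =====

-- B replaces A's arithmetic digit loop (repeated mod and floor-division by ten) by summing the characters of str(n//2050): same values, different digit representation (idiomatic, not faster).

-- ===== PORT A =====
-- A's while loop runs on num = n//2050, which is ≥ 1 whenever the loop is reached
-- (n ≥ 2050); on Nat arguments `% 10` and `// 10` coincide with Python's, so the
-- loop is ported exactly as a Nat recursion (it would not terminate on negatives,
-- which Python never reaches here either).
def div2050Loop (num : Nat) (count : Int) : Int :=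
  if num = 0 then count
  else div2050Loop (num / 10) (count + (num % 10 : Nat))

def div2050 (n : Int) : Int :=
  if n < 2050 then -1
  else if PySem.Int.mod n 2050 = 0 then
    div2050Loop (PySem.Int.floordiv n 2050).toNat 0
  else -1

-- ===== PORT B =====
def div2050_alt (n : Int) : Int :=
  if n < 2050 then -1
  else if PySem.Int.mod n 2050 = 0 then
    (((PySem.Int.toStr (PySem.Int.floordiv n 2050)).toList).map
      (fun c => ((c.toNat : Int) - 48))).sum
  else -1

-- ===== PRECONDITION & SPEC =====
def Spec_div2050 (n : Int) (out : Int) : Prop := out = div2050_alt n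
instance (n : Int) (out : Int) : Decidable (Spec_div2050 n out) := by unfold Spec_div2050; infer_instance

-- ===== CLAIM (what is proved, stated in full; the proofs are below) =====
def Claim_equal_div2050 : Prop := ∀ (n : Int), Dom_div2050 n → Spec_div2050 n (div2050 n)

-- ===== LEMMAS AND PROOFS =====

-- the character-to-digit map used by B
lemma gd (d : Nat) (h : d < 10) : ((Nat.digitChar d).toNat : Int) - 48 = (d : Int) := by
  interval_cases d <;> decide

-- A's loop is count + digit sum
lemma div2050Loop_eq (m : Nat) (c : Int) :
    div2050Loop m c = c + ((Nat.digits 10 m).sum : Int) := by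
  induction m using Nat.strong_induction_on generalizing c with
  | _ m ih =>
    rw [div2050Loop]
    by_cases h0 : m = 0
    · simp [h0]
    · rw [if_neg h0, ih (m / 10) (Nat.div_lt_self (Nat.pos_of_ne_zero h0) (by norm_num)),
        Nat.digits_def' (by norm_num : 1 < 10) (Nat.pos_of_ne_zero h0)]
      simp
      ring

-- B's character sum over toDigitsCore
lemma toDigitsCore_sum : ∀ (f n : Nat) (acc : List Char), n < f →
    ((Nat.toDigitsCore 10 f n acc).map (fun c => ((c.toNat : Int) - 48))).sum
      = ((n % 10 : Nat) : Int) + ((Nat.digits 10 (n / 10)).sum : Int)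
        + ((acc.map (fun c => ((c.toNat : Int) - 48))).sum) := by
  intro f
  induction f with
  | zero => intro n acc h; omega
  | succ f ih =>
    intro n acc h
    rw [Nat.toDigitsCore]
    by_cases hd : n / 10 = 0
    · simp [hd, gd (n % 10) (Nat.mod_lt _ (by norm_num))]
    · rw [if_neg hd]
      have hnpos : 0 < n := by
        rcases Nat.eq_zero_or_pos n with h0 | h0
        · exact absurd (by simp [h0]) hd
        · exact h0
      have hlt : n / 10 < f := by
        have := Nat.div_lt_self hnpos (by norm_num : 1 < 10)
        omega
      rw [ih (n / 10) _ hlt,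
        Nat.digits_def' (by norm_num : 1 < 10) (Nat.pos_of_ne_zero hd)]
      simp [gd (n % 10) (Nat.mod_lt _ (by norm_num))]
      ring

-- B's character sum of str(m) equals the digit sum, for positive m
lemma toDigits_sum (m : Nat) (hm : 0 < m) :
    ((Nat.toDigits 10 m).map (fun c => ((c.toNat : Int) - 48))).sum
      = ((Nat.digits 10 m).sum : Int) := by
  rw [Nat.toDigits, toDigitsCore_sum (m + 1) m [] (Nat.lt_succ_self m),
    Nat.digits_def' (by norm_num : 1 < 10) hm]
  simp

-- ===== VERDICT (by name: the statement is the Claim_ definition above) =====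
theorem div2050_spec : Claim_equal_div2050 := by
  intro n _
  unfold Spec_div2050 div2050 div2050_alt
  by_cases h1 : n < 2050
  · simp [h1]
  · rw [if_neg h1, if_neg h1]
    by_cases h2 : PySem.Int.mod n 2050 = 0
    · rw [if_pos h2, if_pos h2]
      set q := PySem.Int.floordiv n 2050 with hq
      have hq1 : 1 ≤ q := by
        rw [hq, PySem.Int.le_floordiv_iff_mul_le (by norm_num)]
        omega
      have hqn : q = ((q.toNat : Nat) : Int) := (Int.toNat_of_nonneg (by omega)).symm
      have htc : (PySem.Int.toStr q).toList = Nat.toDigits 10 q.toNat := by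
        rw [PySem.Int.toList_toStr, PySem.Int.toChars, if_neg (by omega)]
      rw [htc, toDigits_sum q.toNat (by omega), div2050Loop_eq]
      simp
    · rw [if_neg h2, if_neg h2]
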